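-- pv_equiv track=rewrite | github.com/Shahryar2/multi_agent | test_1.py | zuiwan
-- ===== SOURCE A (Python) =====
-- def zuiwan(n, m, ta, tb, k, ai, bi):
--     # 动态规划：dp[i][j][t] = 取消i个A→B航班、j个B→C航班后的最晚到达时间
--     # 简化：枚举所有可能的组合
--
--     max_time = -1
--
--     # 枚举取消A→B的i个航班，取消B→C的j个航班，其中i+j=k
--     for i in range(k + 1):
--         j = k - i
--         if i > n or j > m:
--             continue
--
--         # 取消i个后，A→B还剩n-i个航班，选最晚的
--         if n - i <= 0 or m - j <= 0:
--             continue
--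
--         ai_sorted = sorted(ai, reverse=True)  # 降序
--         bi_sorted = sorted(bi, reverse=True)  # 降序
--
--         # 选择A→B中第i+1大的航班（取消最小的i个，选最大的）
--         ab_depart = ai_sorted[i]
--         ab_arrive = ab_depart + ta
--
--         # 在B→C中找起飞时间 >= ab_arrive 的最晚航班
--         best_bi = -1
--         for depart in bi_sorted:
--             if depart >= ab_arrive:
--                 best_bi = depart
--                 break
--
--         # 如果找不到满足条件的B→C航班，跳过
--         if best_bi == -1:
--             continue
--
--         arrive_time = best_bi + tb
--         max_time = max(max_time, arrive_time)
--
--     return max_time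
-- ===== SOURCE B (Python) =====
-- def zuiwan(n, m, ta, tb, k, ai, bi):
--     # closed form: all feasible (i, k-i) splits yield the same arrival max(bi)+tb,
--     # and feasibility is monotone in i, so only the largest admissible i matters.
--     lo = max(0, k - (m - 1))
--     hi = min(k, n - 1)
--     if lo > hi or not bi:
--         return -1
--     depart = sorted(ai, reverse=True)[hi]
--     best = max(bi)
--     return max(-1, best + tb) if depart + ta <= best else -1
-- ===== Notes on version B (the rewrite author's own statement) =====
-- stated objective: faster
-- what changed: B replaces A's loop over all k+1 cancellation splits (each resorting both lists and rescanning bi) by a single closed-form test: every feasible split yields the same arrival max(bi)+tb and feasibility is monotone in i, so only the largest admissible i = min(k, n-1) needs checking, with one sort of ai and one max of bi.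
-- intended difference: When max(bi) equals -1, that connection is reachable from the (min(k,n-1)+1)-th largest ai departure, and tb >= 1, A's best_bi=-1 sentinel conflates the real flight departing at time -1 with 'no flight found' and returns -1, while B returns the true arrival -1+tb, which is intended since -1 is a legitimate departure time. — e.g. on zuiwan(1, 1, 0, 1, 0, [-1], [-1]): A returns -1, B returns 0
import Mathlib
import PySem

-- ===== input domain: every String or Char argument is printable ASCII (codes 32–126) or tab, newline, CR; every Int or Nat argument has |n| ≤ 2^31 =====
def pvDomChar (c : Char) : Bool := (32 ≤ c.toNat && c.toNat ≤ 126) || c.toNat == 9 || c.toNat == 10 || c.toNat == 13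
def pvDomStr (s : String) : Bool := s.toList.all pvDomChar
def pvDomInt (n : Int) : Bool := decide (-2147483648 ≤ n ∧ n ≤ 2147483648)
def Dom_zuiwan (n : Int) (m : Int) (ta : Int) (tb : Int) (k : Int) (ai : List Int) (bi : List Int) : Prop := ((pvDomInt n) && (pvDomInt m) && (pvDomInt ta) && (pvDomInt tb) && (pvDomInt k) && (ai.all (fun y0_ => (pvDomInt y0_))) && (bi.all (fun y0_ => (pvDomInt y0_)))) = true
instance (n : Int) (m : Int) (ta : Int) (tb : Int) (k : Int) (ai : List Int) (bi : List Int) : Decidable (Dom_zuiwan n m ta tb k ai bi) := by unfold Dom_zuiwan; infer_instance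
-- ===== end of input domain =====

-- B replaces A's k-iteration loop of resorting and rescanning by one closed-form feasibility test
-- (all feasible splits yield the same arrival max(bi)+tb, and feasibility is monotone in i): faster.

-- ===== PORT A =====
-- A's inner `for depart in bi_sorted: if depart >= ab_arrive: best_bi = depart; break`
def zuiwanFind (bs : List Int) (x : Int) : Int :=
  match bs with
  | [] => -1
  | d :: rest => if x ≤ d then d else zuiwanFind rest x

-- one iteration of A's `for i in range(k + 1)` loop body, acc = max_time
def zuiwanStep (n m ta tb k : Int) (ai bi : List Int) (acc : Int) (i : Int) : Int :=
  let j := k - i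
  if n < i ∨ m < j then acc
  else if n - i ≤ 0 ∨ m - j ≤ 0 then acc
  else
    let aiSorted := PySem.List.sorted ai (fun x => x) true
    let biSorted := PySem.List.sorted bi (fun x => x) true
    let abDepart := (PySem.List.pyGet? aiSorted i).getD 0  -- ai_sorted[i]; IndexError excluded by Pre_
    let abArrive := abDepart + ta
    let bestBi := zuiwanFind biSorted abArrive
    if bestBi = -1 then acc
    else max acc (bestBi + tb)

def zuiwan (n : Int) (m : Int) (ta : Int) (tb : Int) (k : Int) (ai : List Int) (bi : List Int) : Int :=
  (PySem.List.pyRange 0 (k + 1) 1).foldl (zuiwanStep n m ta tb k ai bi) (-1)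

-- ===== PORT B =====
def zuiwan_alt (n : Int) (m : Int) (ta : Int) (tb : Int) (k : Int) (ai : List Int) (bi : List Int) : Int :=
  let lo := max 0 (k - (m - 1))
  let hi := min k (n - 1)
  if lo > hi ∨ bi = [] then -1
  else
    let depart := (PySem.List.pyGet? (PySem.List.sorted ai (fun x => x) true) hi).getD 0
    let best := (PySem.List.max? bi (fun x => x)).getD 0
    if depart + ta ≤ best then max (-1) (best + tb) else -1

-- ===== PRECONDITION & SPEC =====
-- Pre_ excludes exactly the inputs where A raises IndexError (some enumerated cancellation count
-- i reaches min(k, n-1) ≥ len(ai), i.e. the declared n exceeds the actual flight list); B raises there too.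
def Pre_zuiwan (n : Int) (m : Int) (ta : Int) (tb : Int) (k : Int) (ai : List Int) (bi : List Int) : Prop :=
  max 0 (k - (m - 1)) ≤ min k (n - 1) → min k (n - 1) < (ai.length : Int)
instance (n : Int) (m : Int) (ta : Int) (tb : Int) (k : Int) (ai : List Int) (bi : List Int) : Decidable (Pre_zuiwan n m ta tb k ai bi) := by unfold Pre_zuiwan; infer_instance
def pvWitness_zuiwan : Int × Int × Int × Int × Int × List Int × List Int := (1, 1, 0, 1, 0, [1], [1])

-- When the best connecting departure max(bi) equals -1, is reachable (some valid split exists and the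
-- (hi+1)-th largest ai departure connects to it) and tb ≥ 1, A's `best_bi = -1` sentinel conflates that
-- real flight with "no flight found" and A returns -1, while B returns the true arrival -1 + tb, which
-- is the intended value: -1 is a legitimate departure time, not an absence marker.
def D_zuiwan (n : Int) (m : Int) (ta : Int) (tb : Int) (k : Int) (ai : List Int) (bi : List Int) : Prop :=
  bi.max? = some (-1) ∧ 1 ≤ tb ∧
  max (k - m + 1) (ai.countP (fun a => -1 - ta < a) : Int) ≤ min k (n - 1)
instance (n : Int) (m : Int) (ta : Int) (tb : Int) (k : Int) (ai : List Int) (bi : List Int) : Decidable (D_zuiwan n m ta tb k ai bi) := by unfold D_zuiwan; infer_instance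

def Spec_zuiwan (n : Int) (m : Int) (ta : Int) (tb : Int) (k : Int) (ai : List Int) (bi : List Int) (out : Int) : Prop := ¬ D_zuiwan n m ta tb k ai bi → out = zuiwan_alt n m ta tb k ai bi
instance (n : Int) (m : Int) (ta : Int) (tb : Int) (k : Int) (ai : List Int) (bi : List Int) (out : Int) : Decidable (Spec_zuiwan n m ta tb k ai bi out) := by unfold Spec_zuiwan; infer_instance

def pvDiffWitness_zuiwan : Int × Int × Int × Int × Int × List Int × List Int := (1, 1, 0, 1, 0, [-1], [-1])
def pvDiffWitnessOut_zuiwan : Int × Int := (-1, 0)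

-- ===== CLAIM (what is proved, stated in full; the proofs are below) =====
def Claim_unchanged_zuiwan : Prop := ∀ (n : Int) (m : Int) (ta : Int) (tb : Int) (k : Int) (ai : List Int) (bi : List Int), Dom_zuiwan n m ta tb k ai bi → Pre_zuiwan n m ta tb k ai bi → Spec_zuiwan n m ta tb k ai bi (zuiwan n m ta tb k ai bi)
def Claim_changed_zuiwan : Prop := Dom_zuiwan (pvDiffWitness_zuiwan.1) (pvDiffWitness_zuiwan.2.1) (pvDiffWitness_zuiwan.2.2.1) (pvDiffWitness_zuiwan.2.2.2.1) (pvDiffWitness_zuiwan.2.2.2.2.1) (pvDiffWitness_zuiwan.2.2.2.2.2.1) (pvDiffWitness_zuiwan.2.2.2.2.2.2) ∧ Pre_zuiwan (pvDiffWitness_zuiwan.1) (pvDiffWitness_zuiwan.2.1) (pvDiffWitness_zuiwan.2.2.1) (pvDiffWitness_zuiwan.2.2.2.1) (pvDiffWitness_zuiwan.2.2.2.2.1) (pvDiffWitness_zuiwan.2.2.2.2.2.1) (pvDiffWitness_zuiwan.2.2.2.2.2.2) ∧ D_zuiwan (pvDiffWitness_zuiwan.1) (pvDiffWitness_zuiwan.2.1)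 (pvDiffWitness_zuiwan.2.2.1) (pvDiffWitness_zuiwan.2.2.2.1) (pvDiffWitness_zuiwan.2.2.2.2.1) (pvDiffWitness_zuiwan.2.2.2.2.2.1) (pvDiffWitness_zuiwan.2.2.2.2.2.2) ∧ zuiwan (pvDiffWitness_zuiwan.1) (pvDiffWitness_zuiwan.2.1) (pvDiffWitness_zuiwan.2.2.1) (pvDiffWitness_zuiwan.2.2.2.1) (pvDiffWitness_zuiwan.2.2.2.2.1) (pvDiffWitness_zuiwan.2.2.2.2.2.1) (pvDiffWitness_zuiwan.2.2.2.2.2.2) = pvDiffWitnessOut_zuiwan.1 ∧ zuiwan_alt (pvDiffWitness_zuiwan.1) (pvDiffWitness_zuiwan.2.1) (pvDiffWitness_zuiwan.2.2.1) (pvDiffWitness_zuiwan.2.2.2.1) (pvDiffWitness_zuiwan.2.2.2.2.1) (pvDiffWitness_zuiwan.2.2.2.2.2.1) (pvDiffWitness_zuiwan.2.2.2.2.2.2) = pvDiffWitnessOut_zuiwan.2 ∧ pvDiffWitnessOut_zuiwan.1 ≠ pvDiffWitnessOut_zuiwan.2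
def Claim_exact_zuiwan : Prop := ∀ (n : Int) (m : Int) (ta : Int) (tb : Int) (k : Int) (ai : List Int) (bi : List Int), Dom_zuiwan n m ta tb k ai bi → Pre_zuiwan n m ta tb k ai bi → D_zuiwan n m ta tb k ai bi → zuiwan n m ta tb k ai bi ≠ zuiwan_alt n m ta tb k ai bi

-- ===== LEMMAS AND PROOFS =====

theorem zuiwanFind_of_all_lt (l : List Int) (x : Int) (h : ∀ b ∈ l, b < x) : zuiwanFind l x = -1 := by
  induction l with
  | nil => rfl
  | cons d rest ih =>
    have hd := h d (by simp)
    simp only [zuiwanFind, if_neg (by omega : ¬ x ≤ d)]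
    exact ih (fun b hb => h b (by simp [hb]))

-- the first element of the descending sort is the maximum, so A's scan returns max(bi) or -1
theorem zuiwanFind_sorted (bi : List Int) (mb x : Int)
    (hmb : PySem.List.max? bi (fun y => y) = some mb) :
    zuiwanFind (PySem.List.sorted bi (fun y => y) true) x = if x ≤ mb then mb else -1 := by
  have hmem : mb ∈ bi := PySem.List.max?_mem hmb
  have hmax : ∀ y ∈ bi, y ≤ mb := fun y hy => PySem.List.max?_isMax hmb y hy
  have hpw := PySem.List.sorted_pairwise_rev bi (fun y => y)
  cases hS : PySem.List.sorted bi (fun y => y) true with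
  | nil =>
    exfalso
    have : mb ∈ PySem.List.sorted bi (fun y => y) true := (PySem.List.mem_sorted _ _ _ _).2 hmem
    rw [hS] at this; simp at this
  | cons h t =>
    rw [hS] at hpw
    have hall : ∀ b ∈ t, b ≤ h := by
      intro b hb
      exact (List.pairwise_cons.1 hpw).1 b hb
    have hhead_mem : h ∈ bi := (PySem.List.mem_sorted _ _ _ _).1 (by rw [hS]; simp)
    have hmb_mem : mb ∈ h :: t := by
      rw [← hS]; exact (PySem.List.mem_sorted _ _ _ _).2 hmem
    have hhm : h = mb := by
      rcases List.mem_cons.1 hmb_mem with h1 | h1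
      · omega
      · have := hall mb h1
        have := hmax h hhead_mem
        omega
    subst hhm
    by_cases hx : x ≤ h
    · simp [zuiwanFind, hx]
    · simp only [zuiwanFind, if_neg hx]
      exact zuiwanFind_of_all_lt t x (fun b hb => by have := hall b hb; omega)

-- descending sorted list: entries are monotonically non-increasing in the index
theorem sorted_desc_mono (s : List Int) (hpw : s.Pairwise (fun a b => b ≤ a))
    (i j : Nat) (hij : i ≤ j) (hj : j < s.length) : s[j] ≤ s[i] := by
  rcases Nat.lt_or_ge i j with h | h
  · exact (List.pairwise_iff_getElem.1 hpw) i j (by omega) hj h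
  · have : i = j := by omega
    subst this; exact le_refl _

-- descending pairwise list: s[h] ≤ x ↔ at most h entries exceed x
theorem desc_get_le_iff_countP (s : List Int) (hpw : s.Pairwise (fun a b => b ≤ a)) :
    ∀ (h : Nat), ∀ (hh : h < s.length), ∀ (x : Int),
      (s[h] ≤ x ↔ s.countP (fun a => decide (x < a)) ≤ h) := by
  induction s with
  | nil => intro h hh; simp at hh
  | cons hd t ih =>
    intro h hh x
    have hall : ∀ b ∈ t, b ≤ hd := (List.pairwise_cons.1 hpw).1
    have hpt : t.Pairwise (fun a b => b ≤ a) := (List.pairwise_cons.1 hpw).2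
    cases h with
    | zero =>
      simp only [List.getElem_cons_zero, List.countP_cons]
      constructor
      · intro hle
        have h0 : t.countP (fun a => decide (x < a)) = 0 :=
          List.countP_eq_zero.2 (fun a ha => by have := hall a ha; simp; omega)
        simp [h0]; omega
      · intro hc
        by_contra hlt
        simp at hc
        omega
    | succ h' =>
      simp only [List.getElem_cons_succ, List.countP_cons]
      have hh' : h' < t.length := by simpa using hh
      by_cases hx : x < hd
      · rw [if_pos (by simpa using hx)]
        rw [ih hpt h' hh' x]
        omega
      · rw [if_neg (by simpa using hx)]
        have htm : t[h'] ∈ t := List.getElem_mem hh'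
        have h0 : t.countP (fun a => decide (x < a)) = 0 :=
          List.countP_eq_zero.2 (fun a ha => by have := hall a ha; simp; omega)
        constructor
        · intro _; omega
        · intro _
          have := hall _ htm
          omega

theorem countP_sorted_desc (ai : List Int) (x : Int) :
    (PySem.List.sorted ai (fun y => y) true).countP (fun a => decide (x < a))
      = ai.countP (fun a => decide (x < a)) :=
  (PySem.List.sorted_perm ai (fun y => y) true).countP_eq _

-- A's fold of `if cond: max_time = max(max_time, v)` over the index list
theorem foldl_if_max (q : Int → Bool) (v : Int) :
    ∀ (l : List Int) (a : Int),
      l.foldl (fun acc i => if q i then max acc v else acc) a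
        = if l.any q then max a v else a := by
  intro l
  induction l with
  | nil => intro a; simp
  | cons h t ih =>
    intro a
    simp only [List.foldl_cons, List.any_cons]
    by_cases hq : q h = true
    · rw [if_pos hq, ih]
      simp only [hq, Bool.true_or, if_pos rfl]
      split_ifs <;> omega
    · rw [if_neg hq, ih]
      have hq' : q h = false := by revert hq; cases q h <;> simp
      simp only [hq', Bool.false_or]

-- closed form for A under Pre_ with bi nonempty
theorem zuiwan_closed (n m ta tb k : Int) (ai bi : List Int) (mb : Int)
    (hpre : Pre_zuiwan n m ta tb k ai bi)
    (hmb : PySem.List.max? bi (fun y => y) = some mb) :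
    zuiwan n m ta tb k ai bi =
      if max 0 (k - (m - 1)) ≤ min k (n - 1) ∧
         (PySem.List.pyGet? (PySem.List.sorted ai (fun y => y) true) (min k (n - 1))).getD 0 + ta ≤ mb ∧
         mb ≠ -1
      then max (-1) (mb + tb) else -1 := by
  set lo := max 0 (k - (m - 1)) with hlo
  set hi := min k (n - 1) with hhi
  set S := PySem.List.sorted ai (fun y => y) true with hSdef
  have hSlen : S.length = ai.length := PySem.List.length_sorted _ _ _
  have hSpw : S.Pairwise (fun a b => b ≤ a) := PySem.List.sorted_pairwise_rev _ _
  set q : Int → Bool := fun i =>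
    decide (lo ≤ i ∧ i ≤ hi ∧ (PySem.List.pyGet? S i).getD 0 + ta ≤ mb ∧ mb ≠ -1) with hq
  -- step équals the max-accumulate form on every index of the range
  have hstep : ∀ acc i, i ∈ PySem.List.pyRange 0 (k + 1) 1 →
      zuiwanStep n m ta tb k ai bi acc i = if q i then max acc (mb + tb) else acc := by
    intro acc i hmem
    have hir := (PySem.List.mem_pyRange_one).1 hmem
    unfold zuiwanStep
    simp only [← hSdef]
    by_cases hskip1 : n < i ∨ m < k - i
    · rw [if_pos hskip1, if_neg]
      simp only [hq, decide_eq_true_eq]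
      push_neg
      intro _ h2; exfalso; omega
    · rw [if_neg hskip1]
      by_cases hskip2 : n - i ≤ 0 ∨ m - (k - i) ≤ 0
      · rw [if_pos hskip2, if_neg]
        simp only [hq, decide_eq_true_eq]
        push_neg
        intro _ h2; exfalso; omega
      · rw [if_neg hskip2]
        have hvalid : lo ≤ i ∧ i ≤ hi := by constructor <;> omega
        rw [zuiwanFind_sorted bi mb _ hmb]
        by_cases hfe : (PySem.List.pyGet? S i).getD 0 + ta ≤ mb
        · rw [if_pos hfe]
          by_cases hm1 : mb = -1
          · rw [if_pos hm1, if_neg]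
            simp only [hq, decide_eq_true_eq]
            exact fun h => h.2.2.2 hm1
          · rw [if_neg hm1, if_pos]
            simp only [hq, decide_eq_true_eq]
            exact ⟨hvalid.1, hvalid.2, hfe, hm1⟩
        · rw [if_neg hfe, if_pos rfl, if_neg]
          simp only [hq, decide_eq_true_eq]
          push_neg
          intro _ _ h3; exact absurd h3 hfe
  have hfold : zuiwan n m ta tb k ai bi =
      if (PySem.List.pyRange 0 (k + 1) 1).any q then max (-1) (mb + tb) else -1 := by
    unfold zuiwan
    rw [PySem.List.foldl_congr_mem (g := fun acc i => if q i then max acc (mb + tb) else acc)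
      (h := fun acc x hx => hstep acc x hx)]
    exact foldl_if_max q (mb + tb) _ _
  rw [hfold]
  congr 1
  simp only [List.any_eq_true, hq, decide_eq_true_eq, eq_iff_iff]
  constructor
  · rintro ⟨i, hmem, hli, hih, hfe, hm1⟩
    have hir := (PySem.List.mem_pyRange_one).1 hmem
    have hhilen : hi < (ai.length : Int) := hpre (by omega)
    refine ⟨by omega, ?_, hm1⟩
    -- monotonicity: S[hi] ≤ S[i]
    have h0i : 0 ≤ i := by omega
    have h0hi : 0 ≤ hi := by omega
    have hilt : i < (S.length : Int) := by omega
    have hhilt : hi < (S.length : Int) := by omega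
    rw [PySem.List.pyGet?_eq_some_getElem S h0i hilt] at hfe
    rw [PySem.List.pyGet?_eq_some_getElem S h0hi hhilt]
    simp only [Option.getD_some] at hfe ⊢
    have := sorted_desc_mono S hSpw i.toNat hi.toNat (by omega) (by omega)
    omega
  · rintro ⟨hlohi, hfe, hm1⟩
    exact ⟨hi, (PySem.List.mem_pyRange_one).2 (by omega), by omega, le_refl _, hfe, hm1⟩

-- A returns -1 when there is no connecting flight at all
theorem zuiwan_empty (n m ta tb k : Int) (ai : List Int) :
    zuiwan n m ta tb k ai [] = -1 := by
  unfold zuiwan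
  have hstep : ∀ acc i, i ∈ PySem.List.pyRange 0 (k + 1) 1 →
      zuiwanStep n m ta tb k ai [] acc i = acc := by
    intro acc i _
    unfold zuiwanStep
    by_cases h1 : n < i ∨ m < k - i
    · rw [if_pos h1]
    · rw [if_neg h1]
      by_cases h2 : n - i ≤ 0 ∨ m - (k - i) ≤ 0
      · rw [if_pos h2]
      · rw [if_neg h2]
        rfl
  rw [PySem.List.foldl_congr_mem (g := fun acc _ => acc) (h := fun acc x hx => hstep acc x hx)]
  simp

-- the feasibility test in terms of the input alone (used by D_)
theorem feas_iff_countP (ai : List Int) (ta hi : Int)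
    (h0 : 0 ≤ hi) (hlen : hi < (ai.length : Int)) :
    ((PySem.List.pyGet? (PySem.List.sorted ai (fun y => y) true) hi).getD 0 + ta ≤ -1
      ↔ (ai.countP (fun a => decide (-1 - ta < a)) : Int) ≤ hi) := by
  set S := PySem.List.sorted ai (fun y => y) true with hSdef
  have hSlen : S.length = ai.length := PySem.List.length_sorted _ _ _
  have hSpw : S.Pairwise (fun a b => b ≤ a) := PySem.List.sorted_pairwise_rev _ _
  have hhilt : hi < (S.length : Int) := by omega
  rw [PySem.List.pyGet?_eq_some_getElem S h0 hhilt]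
  simp only [Option.getD_some]
  have hcount := desc_get_le_iff_countP S hSpw hi.toNat (by omega) (-1 - ta)
  have hc2 : List.countP (fun a => decide (-1 - ta < a)) S
      = List.countP (fun a => decide (-1 - ta < a)) ai := countP_sorted_desc ai _
  constructor
  · intro h
    have := hcount.1 (by omega)
    omega
  · intro h
    have := hcount.2 (by omega)
    omega

-- Python's max(bi) and Mathlib's List.max? return the same value
theorem pymax_eq_listMax (bi : List Int) (mb : Int)
    (hmb : PySem.List.max? bi (fun y => y) = some mb) : bi.max? = some mb :=
  List.max?_eq_some_iff.2
    ⟨PySem.List.max?_mem hmb, fun b hb => PySem.List.max?_isMax hmb b hb⟩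

-- ===== VERDICT (by name: the statement is the Claim_ definition above) =====
theorem zuiwan_spec : Claim_unchanged_zuiwan := by
  intro n m ta tb k ai bi _hdom hpre
  unfold Spec_zuiwan
  intro hnd
  by_cases hbi : bi = []
  · subst hbi
    rw [zuiwan_empty]
    unfold zuiwan_alt
    simp
  · obtain ⟨mb, hmb⟩ : ∃ mb, PySem.List.max? bi (fun y => y) = some mb := by
      cases h : PySem.List.max? bi (fun y => y) with
      | none => exact absurd ((PySem.List.max?_eq_none_iff _ _).1 h) hbi
      | some mb => exact ⟨mb, rfl⟩
    rw [zuiwan_closed n m ta tb k ai bi mb hpre hmb]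
    unfold zuiwan_alt
    simp only [hmb, Option.getD_some]
    set lo := max 0 (k - (m - 1)) with hlo
    set hi := min k (n - 1) with hhiq
    set d := (PySem.List.pyGet? (PySem.List.sorted ai (fun y => y) true) hi).getD 0 with hd
    by_cases hlohi : lo ≤ hi
    · rw [if_neg (show ¬ (lo > hi ∨ bi = []) from by
        rintro (h | h)
        · omega
        · exact hbi h)]
      by_cases hfe : d + ta ≤ mb
      · by_cases hm1 : mb = -1
        · rw [if_neg (show ¬ (lo ≤ hi ∧ d + ta ≤ mb ∧ mb ≠ -1) from
              fun h => h.2.2 hm1), if_pos hfe]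
          -- here A drops the flight; outside D_ this still agrees because tb ≤ 0
          have hlen : hi < (ai.length : Int) := hpre hlohi
          have htb : ¬ (1 ≤ tb) := by
            intro htb
            apply hnd
            refine ⟨by rw [pymax_eq_listMax bi mb hmb, hm1], htb, ?_⟩
            have hc : (ai.countP (fun a => decide (-1 - ta < a)) : Int) ≤ hi := by
              rw [← feas_iff_countP ai ta hi (by omega) hlen, ← hd]
              omega
            omega
          subst hm1
          omega
        · rw [if_pos ⟨hlohi, hfe, hm1⟩, if_pos hfe]
      · rw [if_neg (show ¬ (lo ≤ hi ∧ d + ta ≤ mb ∧ mb ≠ -1) from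
              fun h => hfe h.2.1), if_neg hfe]
    · rw [if_neg (show ¬ (lo ≤ hi ∧ d + ta ≤ mb ∧ mb ≠ -1) from
              fun h => hlohi h.1),
          if_pos (show lo > hi ∨ bi = [] from Or.inl (by omega))]

theorem zuiwan_changed : Claim_changed_zuiwan := by
  unfold Claim_changed_zuiwan; decide

theorem zuiwan_tight : Claim_exact_zuiwan := by
  intro n m ta tb k ai bi _hdom hpre hD
  obtain ⟨hmbL, htb, hmx⟩ := hD
  have hbi' : bi ≠ [] := by
    intro h; subst h; simp at hmbL
  obtain ⟨mb', hmb'⟩ : ∃ mb', PySem.List.max? bi (fun y => y) = some mb' := by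
    cases h : PySem.List.max? bi (fun y => y) with
    | none => exact absurd ((PySem.List.max?_eq_none_iff _ _).1 h) hbi'
    | some mb' => exact ⟨mb', rfl⟩
  have hmbv : mb' = -1 := by
    have := pymax_eq_listMax bi mb' hmb'
    rw [hmbL] at this
    exact (Option.some_injective _ this.symm)
  subst hmbv
  have hmb := hmb'
  have hlohi : max 0 (k - (m - 1)) ≤ min k (n - 1) := by omega
  have hlen : min k (n - 1) < (ai.length : Int) := hpre hlohi
  have hcnt : (ai.countP (fun a => decide (-1 - ta < a)) : Int) ≤ min k (n - 1) := by omega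
  rw [zuiwan_closed n m ta tb k ai bi (-1) hpre hmb]
  unfold zuiwan_alt
  simp only [hmb, Option.getD_some]
  have hbi : bi ≠ [] := by
    intro h; subst h; simp [PySem.List.max?] at hmb
  set lo := max 0 (k - (m - 1)) with hlo
  set hi := min k (n - 1) with hhiq
  set d := (PySem.List.pyGet? (PySem.List.sorted ai (fun y => y) true) hi).getD 0 with hd
  have hfe : d + ta ≤ -1 := by
    rw [hd, feas_iff_countP ai ta hi (by omega) hlen]
    exact hcnt
  rw [if_neg (show ¬ (lo ≤ hi ∧ d + ta ≤ (-1 : Int) ∧ (-1 : Int) ≠ -1) from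
        fun h => h.2.2 rfl)]
  rw [if_neg (show ¬ (lo > hi ∨ bi = []) from by
        rintro (h | h)
        · omega
        · exact hbi h),
      if_pos hfe]
  omega
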